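-- pv_equiv track=rewrite | github.com/Eduardo-VCP/generador-nombres-clikealo | general_archive/generar-nombres.py | validar_nombre_pestana
-- ===== SOURCE A (Python) =====
-- def validar_nombre_pestana(nombre):
--     # Excel tiene límites: máximo 31 caracteres, no puede contener: \ / ? * [ ]
--     caracteres_prohibidos = ['\\', '/', '?', '*', '[', ']']
--     nombre_limpio = nombre
--
--     # Remover caracteres prohibidos
--     for char in caracteres_prohibidos:
--         nombre_limpio = nombre_limpio.replace(char, '')
--
--     # Limitar a 31 caracteres
--     if len(nombre_limpio) > 31:
--         nombre_limpio = nombre_limpio[:31]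
--
--     # Si quedó vacío, usar un nombre por defecto
--     if not nombre_limpio:
--         nombre_limpio = "Productos"
--
--     return nombre_limpio
-- ===== SOURCE B (Python) =====
-- def validar_nombre_pestana(nombre):
--     prohibidos = {'\\', '/', '?', '*', '[', ']'}
--     limpio = ''.join(c for c in nombre if c not in prohibidos)[:31]
--     return limpio if limpio else "Productos"
-- ===== Notes on version B (the rewrite author's own statement) =====
-- stated objective: simpler
-- what changed: Replaces six sequential blacklist-driven replace() scans with one input-driven filtering pass over the characters (set membership), followed by an unconditional [:31] slice.
import Mathlib
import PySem

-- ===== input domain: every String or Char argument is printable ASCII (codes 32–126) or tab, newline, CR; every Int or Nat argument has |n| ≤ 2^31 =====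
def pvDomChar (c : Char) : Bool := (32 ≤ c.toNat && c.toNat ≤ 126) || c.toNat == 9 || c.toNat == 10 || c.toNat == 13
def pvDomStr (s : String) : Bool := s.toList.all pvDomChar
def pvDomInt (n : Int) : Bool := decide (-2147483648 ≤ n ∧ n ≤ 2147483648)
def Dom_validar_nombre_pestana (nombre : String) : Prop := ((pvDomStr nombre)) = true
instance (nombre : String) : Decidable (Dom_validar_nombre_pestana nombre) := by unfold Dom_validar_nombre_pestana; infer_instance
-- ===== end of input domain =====

-- B replaces six sequential single-character replace() scans with one filtering pass
-- over the input plus an unconditional [:31] truncation (objective: simpler).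


-- ===== PORT A =====
def validar_nombre_pestana (nombre : String) : String :=
  let caracteres_prohibidos : List String := ["\\", "/", "?", "*", "[", "]"]
  -- for char in caracteres_prohibidos: nombre_limpio = nombre_limpio.replace(char, '')
  let nombre_limpio :=
    caracteres_prohibidos.foldl (fun s ch => PySem.Str.replace s ch "") nombre
  let nombre_limpio :=
    if PySem.Str.len nombre_limpio > 31 then PySem.Str.slice nombre_limpio none (some 31)
    else nombre_limpio
  if nombre_limpio = "" then "Productos" else nombre_limpio

-- ===== PORT B =====
def validar_nombre_pestana_alt (nombre : String) : String :=
  let prohibidos : List Char := ['\\', '/', '?', '*', '[', ']']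
  -- ''.join(c for c in nombre if c not in prohibidos)[:31]   ([:31] on a list = take 31, exact)
  let limpio := String.ofList ((nombre.toList.filter (fun c => !prohibidos.contains c)).take 31)
  if limpio = "" then "Productos" else limpio

-- ===== PRECONDITION & SPEC =====
def Spec_validar_nombre_pestana (nombre : String) (out : String) : Prop := out = validar_nombre_pestana_alt nombre
instance (nombre : String) (out : String) : Decidable (Spec_validar_nombre_pestana nombre out) := by unfold Spec_validar_nombre_pestana; infer_instance

-- ===== CLAIM (what is proved, stated in full; the proofs are below) =====
def Claim_equal_validar_nombre_pestana : Prop := ∀ (nombre : String), Dom_validar_nombre_pestana nombre → Spec_validar_nombre_pestana nombre (validar_nombre_pestana nombre)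

-- ===== LEMMAS AND PROOFS =====

-- replace.go with a single-character pattern and empty replacement filters that character out
theorem replace_go_single (c : Char) (l : List Char) (fuel : Nat) (acc : List Char)
    (h : l.length ≤ fuel) :
    PySem.Chars.replace.go [c] [] fuel l acc
      = acc.reverse ++ l.filter (fun x => !(x == c)) := by
  induction l generalizing fuel acc with
  | nil =>
      cases fuel <;> simp [PySem.Chars.replace.go]
  | cons c' t ih =>
      cases fuel with
      | zero => simp at h
      | succ f =>
          simp only [List.length_cons, Nat.succ_le_succ_iff] at h
          by_cases hc : c = c'
          · rw [show PySem.Chars.replace.go [c] [] (f+1) (c' :: t) acc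
                  = PySem.Chars.replace.go [c] [] f t acc from by
                  simp [PySem.Chars.replace.go, List.isPrefixOf, hc]]
            rw [ih f acc h]
            simp [hc.symm]
          · rw [show PySem.Chars.replace.go [c] [] (f+1) (c' :: t) acc
                  = PySem.Chars.replace.go [c] [] f t (c' :: acc) from by
                  simp [PySem.Chars.replace.go, List.isPrefixOf, hc]]
            rw [ih f (c' :: acc) h]
            simp [Ne.symm hc]

theorem replace_single (s : List Char) (c : Char) :
    PySem.Chars.replace s [c] [] = s.filter (fun x => !(x == c)) := by
  rw [PySem.Chars.replace]
  simp [replace_go_single c s s.length [] (le_refl _)]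

-- the six sequential single-character filters are one filter by non-membership
theorem foldl_filter_chars (cs l : List Char) :
    cs.foldl (fun acc c => acc.filter (fun x => !(x == c))) l
      = l.filter (fun x => !(cs.contains x)) := by
  induction cs generalizing l with
  | nil => simp
  | cons c rest ih =>
      rw [List.foldl_cons, ih, List.filter_filter]
      apply List.filter_congr
      intro x _
      have hb : (x == c) = decide (x = c) := by
        by_cases hx : x = c <;> simp [hx]
      simp [hb, Bool.not_or, Bool.and_comm]

-- ===== VERDICT (by name: the statement is the Claim_ definition above) =====
theorem validar_nombre_pestana_spec : Claim_equal_validar_nombre_pestana := by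
  intro nombre _
  unfold Spec_validar_nombre_pestana validar_nombre_pestana validar_nombre_pestana_alt
  dsimp only
  have h0 : ("" : String).toList = [] := by decide
  have h1 : ("\\" : String).toList = ['\\'] := by decide
  have h2 : ("/" : String).toList = ['/'] := by decide
  have h3 : ("?" : String).toList = ['?'] := by decide
  have h4 : ("*" : String).toList = ['*'] := by decide
  have h5 : ("[" : String).toList = ['['] := by decide
  have h6 : ("]" : String).toList = [']'] := by decide
  have hA : ((["\\", "/", "?", "*", "[", "]"] : List String).foldl
        (fun s ch => PySem.Str.replace s ch "") nombre).toList
      = nombre.toList.filter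
          (fun x => !((['\\', '/', '?', '*', '[', ']'] : List Char).contains x)) := by
    rw [← foldl_filter_chars]
    simp only [List.foldl_cons, List.foldl_nil, PySem.Str.toList_replace,
      h0, h1, h2, h3, h4, h5, h6, replace_single]
  have hEq : (if PySem.Str.len ((["\\", "/", "?", "*", "[", "]"] : List String).foldl
          (fun s ch => PySem.Str.replace s ch "") nombre) > 31
        then PySem.Str.slice ((["\\", "/", "?", "*", "[", "]"] : List String).foldl
          (fun s ch => PySem.Str.replace s ch "") nombre) none (some 31)
        else (["\\", "/", "?", "*", "[", "]"] : List String).foldl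
          (fun s ch => PySem.Str.replace s ch "") nombre)
      = String.ofList ((nombre.toList.filter
          (fun x => !((['\\', '/', '?', '*', '[', ']'] : List Char).contains x))).take 31) := by
    apply String.toList_injective
    split_ifs with hlen
    · rw [PySem.Str.toList_slice]
      simp only [PySem.Chars.slice_eq_listSlice]
      rw [PySem.List.slice_to, hA]
      simp
      norm_num
    · have hle : (nombre.toList.filter
          (fun x => !((['\\', '/', '?', '*', '[', ']'] : List Char).contains x))).length ≤ 31 := by
        simp only [PySem.Str.len, hA, not_lt] at hlen
        exact_mod_cast hlen
      rw [hA, List.take_of_length_le hle]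
      simp
  rw [hEq]
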